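-- pv_equiv track=rewrite | github.com/opsmill/infrahub-demo-edge | models/infrastructure_edge.py | site_names_generator
-- ===== SOURCE A (Python) =====
-- from typing import Dict, List
--
-- SITES = ["atl", "ord", "lnd", "den", "dfw", "jfk", "bkk", "sfo", "iah", "mco"]
--
-- def site_names_generator(nbr_site=2) -> List[str]:
--     """Generate a list of site names by iterating over the list of SITES defined above and by increasing the id.
--
--     site_names_generator(nbr_site=5)
--         result >> ["atl1", "ord1", "jfk1", "den1", "dfw1"]
--
--     site_names_generator(nbr_site=12)
--         result >> ["atl1", "ord1", "jfk1", "den1", "dfw1", "iad1", "bkk1", "sfo1", "iah1", "mco1", "atl2", "ord2"]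
--     """
--
--     site_names: List[str] = []
--
--     # Calculate how many loop over the entire list we need to make
--     # and how many site we need to generate on the last loop
--     nbr_loop = (int(nbr_site / len(SITES))) + 1
--     nbr_last_loop = nbr_site % len(SITES) or len(SITES)
--
--     for idx in range(1, 1 + nbr_loop):
--         nbr_this_loop = len(SITES)
--         if idx == nbr_loop:
--             nbr_this_loop = nbr_last_loop
--
--         site_names.extend([f"{site}{idx}" for site in SITES[:nbr_this_loop]])
--
--     return site_names
-- ===== SOURCE B (Python) =====
-- from typing import List
--
-- SITES = ["atl", "ord", "lnd", "den", "dfw", "jfk", "bkk", "sfo", "iah", "mco"]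
--
-- def site_names_generator(nbr_site=2) -> List[str]:
--     """Generate nbr_site site names by cycling through SITES, bumping the numeric suffix each full cycle."""
--     n = len(SITES)
--     return [f"{SITES[i % n]}{i // n + 1}" for i in range(nbr_site)]
-- ===== Notes on version B (the rewrite author's own statement) =====
-- stated objective: simpler
-- what changed: Replaces A's nested construction (outer loop over a computed pass count, inner SITES slice with a special-cased last pass) by a single comprehension over range(nbr_site) that derives each name from its index i as SITES[i % len(SITES)] with suffix i // len(SITES) + 1.
-- intended difference: When nbr_site is a nonnegative multiple of len(SITES) (including zero), or negative but less than one full cycle below zero, A returns nbr_site+len(SITES) names (a spurious extra pass); B returns exactly max(nbr_site, 0) names, which is what the function's docstring promises. — e.g. on site_names_generator(0): A returns ["atl1", "ord1", "lnd1", "den1", "dfw1", "jfk1", "bkk1", "sfo1", "iah1", "mco1"], B returns []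
import Mathlib
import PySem

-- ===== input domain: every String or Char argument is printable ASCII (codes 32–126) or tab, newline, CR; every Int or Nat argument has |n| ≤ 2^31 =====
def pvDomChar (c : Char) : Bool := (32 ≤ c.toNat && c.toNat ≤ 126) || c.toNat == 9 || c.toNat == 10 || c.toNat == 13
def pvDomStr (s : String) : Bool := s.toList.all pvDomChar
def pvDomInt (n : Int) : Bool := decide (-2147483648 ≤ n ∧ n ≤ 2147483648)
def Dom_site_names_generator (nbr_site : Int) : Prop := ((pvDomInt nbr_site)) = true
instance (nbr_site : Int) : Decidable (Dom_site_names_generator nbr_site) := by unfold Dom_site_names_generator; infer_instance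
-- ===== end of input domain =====

-- B replaces A's nested passes (outer loop count, inner SITES slice with a special-cased
-- last pass) by one comprehension over range(nbr_site) (objective: simpler); A's extra
-- names at nonnegative multiples of len(SITES) and for -9..-1 are stated as D_ below.


def SITES : List String := ["atl", "ord", "lnd", "den", "dfw", "jfk", "bkk", "sfo", "iah", "mco"]

-- ===== PORT A =====
-- int(nbr_site / len(SITES)) is float true division then truncation: exact as Int
-- truncation (PySem.Int.truncdiv) on the |n| ≤ 2^31 domain.
def site_names_generator (nbr_site : Int) : List String :=
  let site_names : List String := []
  let nbr_loop : Int := PySem.Int.truncdiv nbr_site (SITES.length : Int) + 1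
  let nbr_last_loop : Int :=
    if PySem.Int.mod nbr_site (SITES.length : Int) = 0 then (SITES.length : Int)
    else PySem.Int.mod nbr_site (SITES.length : Int)   -- `x or y`: y exactly when x == 0
  (PySem.List.pyRange 1 (1 + nbr_loop) 1).foldl
    (fun acc idx =>
      let nbr_this_loop : Int := if idx = nbr_loop then nbr_last_loop else (SITES.length : Int)
      acc ++ (PySem.List.slice SITES none (some nbr_this_loop)).map
        (fun site => site ++ PySem.Int.toStr idx))
    site_names

-- ===== PORT B =====
def site_names_generator_alt (nbr_site : Int) : List String :=
  let n : Int := (SITES.length : Int)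
  (PySem.List.pyRange 0 nbr_site 1).map
    (fun i => PySem.List.pyGetD SITES (PySem.Int.mod i n) ""
              ++ PySem.Int.toStr (PySem.Int.floordiv i n + 1))

-- ===== PRECONDITION & SPEC =====
-- When nbr_site is a nonnegative multiple of len(SITES) (including zero), or negative
-- but less than one full cycle below zero, A returns nbr_site+len(SITES) names (a
-- spurious extra pass); B returns exactly max(nbr_site, 0) names, which is what the
-- function's docstring promises.
def D_site_names_generator (nbr_site : Int) : Prop :=
  (0 ≤ nbr_site ∧ nbr_site % 10 = 0) ∨ (-9 ≤ nbr_site ∧ nbr_site ≤ -1)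
instance (nbr_site : Int) : Decidable (D_site_names_generator nbr_site) := by unfold D_site_names_generator; infer_instance

def Spec_site_names_generator (nbr_site : Int) (out : List String) : Prop :=
  ¬ D_site_names_generator nbr_site → out = site_names_generator_alt nbr_site
instance (nbr_site : Int) (out : List String) : Decidable (Spec_site_names_generator nbr_site out) := by unfold Spec_site_names_generator; infer_instance

def pvDiffWitness_site_names_generator : Int := 0
def pvDiffWitnessOut_site_names_generator : (List String) × (List String) :=
  (["atl1", "ord1", "lnd1", "den1", "dfw1", "jfk1", "bkk1", "sfo1", "iah1", "mco1"], [])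

-- ===== CLAIM (what is proved, stated in full; the proofs are below) =====
def Claim_unchanged_site_names_generator : Prop := ∀ (nbr_site : Int), Dom_site_names_generator nbr_site → Spec_site_names_generator nbr_site (site_names_generator nbr_site)
def Claim_changed_site_names_generator : Prop := Dom_site_names_generator (pvDiffWitness_site_names_generator) ∧ D_site_names_generator (pvDiffWitness_site_names_generator) ∧ site_names_generator (pvDiffWitness_site_names_generator) = pvDiffWitnessOut_site_names_generator.1 ∧ site_names_generator_alt (pvDiffWitness_site_names_generator) = pvDiffWitnessOut_site_names_generator.2 ∧ pvDiffWitnessOut_site_names_generator.1 ≠ pvDiffWitnessOut_site_names_generator.2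

-- ===== LEMMAS AND PROOFS =====

-- B's per-index name, as a function (proof helper).
def canonName (i : Int) : String :=
  PySem.List.pyGetD SITES (PySem.Int.mod i 10) ""
    ++ PySem.Int.toStr (PySem.Int.floordiv i 10 + 1)

theorem canonName_eq (j : Int) (t : Nat) (ht : t < 10) :
    canonName (10 * j + (t : Int)) = SITES.getD t "" ++ PySem.Int.toStr (j + 1) := by
  have hmod : PySem.Int.mod (10 * j + (t : Int)) 10 = (t : Int) := by
    rw [PySem.Int.mod_eq_emod_of_pos (by norm_num)]
    rw [add_comm, Int.add_mul_emod_self_left]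
    omega
  have hdiv : PySem.Int.floordiv (10 * j + (t : Int)) 10 = j := by
    rw [PySem.Int.floordiv_eq_iff_of_pos (by norm_num)]
    omega
  rw [canonName, hmod, hdiv, PySem.List.pyGetD_natCast]

-- One pass of A at index j+1 taking c sites = B's names for indices 10*j .. 10*j+c.
theorem chunk_eq (j c : Int) (h1 : 1 ≤ c) (h2 : c ≤ 10) :
    (PySem.List.slice SITES none (some c)).map (fun s => s ++ PySem.Int.toStr (j + 1))
      = (PySem.List.pyRange (10 * j) (10 * j + c) 1).map canonName := by
  have hc : c = ((c.toNat : Nat) : Int) := by omega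
  rw [hc, PySem.List.slice_to_natCast, PySem.List.pyRange_one, List.map_map]
  have hb : (10 * j + (c.toNat : Int) - 10 * j).toNat = c.toNat := by omega
  rw [hb]
  apply List.ext_getElem
  · simp only [List.length_map, List.length_take, List.length_range]
    have h10 : SITES.length = 10 := by decide
    omega
  · intro i h₁ h₂
    simp only [List.getElem_map, List.getElem_take, List.getElem_range, Function.comp_apply]
    have hi : i < 10 := by simp at h₂; omega
    rw [canonName_eq j i hi]
    congr 1
    simp at h₁
    have : i < SITES.length := by simp [SITES]; omega
    rw [List.getD_eq_getElem _ _ this]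

-- k full passes of A = B's names for indices 0 .. 10*k.
theorem full_eq (k : Nat) :
    (PySem.List.pyRange 1 (1 + (k : Int)) 1).flatMap
        (fun idx => SITES.map (fun s => s ++ PySem.Int.toStr idx))
      = (PySem.List.pyRange 0 (10 * (k : Int)) 1).map canonName := by
  induction k with
  | zero => simp
  | succ k ih =>
    have hc : (((k : Nat) + 1 : Nat) : Int) = (k : Int) + 1 := by push_cast; ring
    rw [hc, show (1 : Int) + ((k : Int) + 1) = (1 + (k : Int)) + 1 from by ring,
      PySem.List.pyRange_one_succ_right (by omega), List.flatMap_append, ih]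
    have hsl : SITES = PySem.List.slice SITES none (some 10) := by decide
    have hch := chunk_eq (k : Int) 10 (by omega) (by omega)
    have h2 : ((1 : Int) + (k : Int)) = (k : Int) + 1 := by ring
    simp only [List.flatMap_cons, List.flatMap_nil, List.append_nil, h2]
    rw [hsl, hch, ← List.map_append,
      ← PySem.List.pyRange_one_append 0 (10 * (k : Int)) (10 * (k : Int) + 10) (by omega) (by omega),
      show (10 : Int) * ((k : Int) + 1) = 10 * (k : Int) + 10 from by ring]

-- A's whole loop, for any loop count L and last-pass size 1 ≤ M ≤ 10,
-- equals a flat pass over (L-1)*10 + M indices.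
theorem loop_eq (L M : Int) (h1 : 1 ≤ M) (h2 : M ≤ 10) :
    (PySem.List.pyRange 1 (1 + L) 1).foldl
        (fun acc idx =>
          acc ++ (PySem.List.slice SITES none (some (if idx = L then M else 10))).map
            (fun s => s ++ PySem.Int.toStr idx)) []
      = (PySem.List.pyRange 0 ((L - 1) * 10 + M) 1).map canonName := by
  rw [PySem.List.foldl_append_eq_flatMap]
  rcases (by omega : L ≤ 0 ∨ 0 < L) with hL | hL
  · rw [PySem.List.pyRange_one_eq_nil (by omega : (1:Int) + L ≤ 1),
      PySem.List.pyRange_one_eq_nil (by omega : (L - 1) * 10 + M ≤ 0)]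
    simp
  · -- L ≥ 1: split off the last pass
    set k : Nat := (L - 1).toNat with hk
    have hLk : L = (k : Int) + 1 := by omega
    have hsplit : (1 : Int) + L = (1 + (k : Int)) + 1 := by omega
    rw [hsplit, PySem.List.pyRange_one_succ_right (by omega), List.flatMap_append]
    have hfull : ∀ idx ∈ PySem.List.pyRange 1 (1 + (k : Int)) 1,
        (PySem.List.slice SITES none (some (if idx = L then M else 10))).map
            (fun s => s ++ PySem.Int.toStr idx)
          = SITES.map (fun s => s ++ PySem.Int.toStr idx) := by
      intro idx hidx
      rw [PySem.List.mem_pyRange_one] at hidx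
      have : idx ≠ L := by omega
      rw [if_neg this, (by decide : PySem.List.slice SITES none (some 10) = SITES)]
    rw [List.flatMap_congr hfull, full_eq k]
    have hlast : (1 : Int) + (k : Int) = L := by omega
    have hMchunk := chunk_eq (k : Int) M h1 h2
    simp only [List.flatMap_cons, List.flatMap_nil, List.append_nil, hlast, if_true]
    rw [show PySem.Int.toStr L = PySem.Int.toStr ((k : Int) + 1) by rw [hLk]]
    rw [hMchunk, ← List.map_append,
      ← PySem.List.pyRange_one_append 0 (10 * (k : Int)) (10 * (k : Int) + M) (by omega) (by omega),
      show (L - 1) * 10 + M = 10 * (k : Int) + M from by omega, List.nil_append]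

theorem len_sites : ((SITES.length : Nat) : Int) = 10 := by decide

-- A in canonical form: a flat map of canonName over the index count A effectively uses.
theorem A_eq_canon (n : Int) :
    site_names_generator n
      = (PySem.List.pyRange 0
          (PySem.Int.truncdiv n 10 * 10
            + (if PySem.Int.mod n 10 = 0 then (10 : Int) else PySem.Int.mod n 10)) 1).map canonName := by
  unfold site_names_generator
  simp only [len_sites]
  set M : Int := if PySem.Int.mod n 10 = 0 then (10 : Int) else PySem.Int.mod n 10 with hM
  have h1 : 1 ≤ M := by
    rw [hM]; split_ifs with h
    · norm_num
    · have := PySem.Int.mod_nonneg n (b := 10) (by norm_num); omega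
  have h2 : M ≤ 10 := by
    rw [hM]; split_ifs with h
    · norm_num
    · have := PySem.Int.mod_lt n (b := 10) (by norm_num); omega
  have := loop_eq (PySem.Int.truncdiv n 10 + 1) M h1 h2
  simpa using this

theorem B_eq_canon (n : Int) :
    site_names_generator_alt n = (PySem.List.pyRange 0 n 1).map canonName := by
  unfold site_names_generator_alt canonName
  simp only [len_sites]

-- A's effective index count as plain emod/tdiv arithmetic.
theorem count_eq (n : Int) :
    PySem.Int.truncdiv n 10 * 10
        + (if PySem.Int.mod n 10 = 0 then (10 : Int) else PySem.Int.mod n 10)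
      = Int.tdiv n 10 * 10 + (if n % 10 = 0 then (10 : Int) else n % 10) := by
  rw [PySem.Int.mod_eq_emod_of_pos (by norm_num : (0:Int) < 10)]
  rfl

theorem tdiv_nonneg_eq (n : Int) (h : 0 ≤ n) : Int.tdiv n 10 = n / 10 :=
  Int.tdiv_eq_ediv_of_nonneg h

theorem tdiv_neg_eq (n : Int) (h : n ≤ 0) : Int.tdiv n 10 = -((-n) / 10) := by
  have h1 := Int.neg_tdiv n 10
  have h2 : (-n).tdiv 10 = (-n) / 10 := Int.tdiv_eq_ediv_of_nonneg (by omega)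
  omega

-- ===== VERDICT (by name: the statements are the Claim_ definitions above) =====
theorem site_names_generator_spec : Claim_unchanged_site_names_generator := by
  intro n _ hD
  rw [A_eq_canon, B_eq_canon, count_eq]
  unfold D_site_names_generator at hD
  rcases (by omega : (1 ≤ n ∧ ¬ n % 10 = 0) ∨ n ≤ -10) with ⟨hpos, hnz⟩ | hneg
  · rw [if_neg hnz, tdiv_nonneg_eq n (by omega),
      (by omega : n / 10 * 10 + n % 10 = n)]
  · have ht := tdiv_neg_eq n (by omega)
    have hd : 1 ≤ (-n) / 10 := by omega
    have hm : n % 10 ≤ 9 := by omega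
    have hm0 : 0 ≤ n % 10 := by omega
    rw [PySem.List.pyRange_one_eq_nil (by omega : n ≤ 0),
      PySem.List.pyRange_one_eq_nil (by split_ifs <;> omega)]

theorem site_names_generator_changed : Claim_changed_site_names_generator := by
  unfold Claim_changed_site_names_generator; decide
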